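-- pv_equiv track=rewrite | github.com/jmthibault79/rosalind | textbook/Stepic-26-7.py | cut
-- ===== SOURCE A (Python) =====
-- def cyclic_spectrum(peptide):
-- 	out_spectrum = [0, sum(peptide)]
--
-- 	peptide_2 = peptide + peptide	# for easy cyclic access
-- 	for k in range(1, len(peptide)):
-- 		for n in range(len(peptide)):
-- 			subpep = peptide_2[n:n+k]
-- 			out_spectrum.append(sum(subpep))
-- 	return sorted(out_spectrum)
--
-- def score(candidate, target):
-- 	import collections
-- 	c_spectrum = cyclic_spectrum(candidate)
-- 	c_counter = collections.Counter(c_spectrum)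
-- 	t_counter = collections.Counter(target)
--
-- 	s = 0
-- 	for mass in c_counter:
-- 		if mass in t_counter:
-- 			s = s + min(c_counter[mass],t_counter[mass])
--
-- 	return s
--
-- def cut(candidates, target, n):
-- 	if len(candidates) <= n:
-- 		return candidates
--
-- 	leaderboard = {}
-- 	for candidate in candidates:
-- 		s = score(candidate, target)
-- 		if s in leaderboard:
-- 			leaderboard[s].append(candidate)
-- 		else:
-- 			leaderboard[s] = [candidate]
--
-- 	survivors = []
-- 	survivors_to_choose = n
-- 	for s in sorted(leaderboard.keys(), reverse=True):
-- 		survivors.extend(leaderboard[s])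
-- 		survivors_to_choose = survivors_to_choose - len(leaderboard[s])
-- 		if survivors_to_choose < 0:
-- 			break
--
-- 	return survivors
-- ===== SOURCE B (Python) =====
-- import collections
--
-- def _score(candidate, target):
--     # prefix sums over the doubled peptide: each cyclic subpeptide mass in O(1)
--     L = len(candidate)
--     pre = [0]
--     for m in candidate + candidate:
--         pre.append(pre[-1] + m)
--     spectrum = [0, pre[L]]
--     for k in range(1, L):
--         for i in range(L):
--             spectrum.append(pre[i + k] - pre[i])
--     common = collections.Counter(spectrum) & collections.Counter(target)
--     return sum(common.values())
--
-- def cut(candidates, target, n):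
--     if len(candidates) <= n:
--         return candidates
--     pairs = [(_score(c, target), c) for c in candidates]
--     out = []
--     for s in sorted({t for t, _ in pairs}, reverse=True):
--         out.extend(c for t, c in pairs if t == s)
--         if len(out) > n:
--             break
--     return out
-- ===== Notes on version B (the rewrite author's own statement) =====
-- stated objective: alternative
-- what changed: Each candidate's cyclic spectrum is built from prefix sums of the doubled peptide (O(1) per subpeptide mass instead of an O(L) slice sum) and scored by Counter intersection without sorting the spectrum, and the top-n-with-ties selection filters score groups from a once-computed score/candidate list instead of building a grouping dict.
import Mathlib
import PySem

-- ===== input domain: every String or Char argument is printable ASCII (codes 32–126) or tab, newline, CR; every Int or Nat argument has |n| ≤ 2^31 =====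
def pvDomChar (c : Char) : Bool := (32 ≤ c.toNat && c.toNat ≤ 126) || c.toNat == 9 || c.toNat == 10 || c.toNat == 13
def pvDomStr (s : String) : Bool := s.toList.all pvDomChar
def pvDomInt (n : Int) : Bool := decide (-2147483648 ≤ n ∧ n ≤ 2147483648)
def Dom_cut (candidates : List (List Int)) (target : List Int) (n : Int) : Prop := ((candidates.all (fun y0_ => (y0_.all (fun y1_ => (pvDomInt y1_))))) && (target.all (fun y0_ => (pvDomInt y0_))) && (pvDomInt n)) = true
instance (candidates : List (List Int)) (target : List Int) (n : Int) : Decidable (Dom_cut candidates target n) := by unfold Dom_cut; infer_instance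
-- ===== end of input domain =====

-- B scores each candidate via prefix sums of the doubled peptide (instead of an O(L) slice sum
-- per cyclic subpeptide) with Counter-intersection scoring, and selects the top-n-with-ties
-- survivors by filtering score groups from a once-computed score list instead of a grouping dict.

-- ===== PORT A =====
def pvCyclicSpectrum (peptide : List Int) : List Int :=
  let outSpectrum : List Int := [0, peptide.sum]
  let peptide2 := peptide ++ peptide
  let outSpectrum := (PySem.List.pyRange 1 (peptide.length : Int) 1).foldl (fun acc k =>
    (PySem.List.pyRange 0 (peptide.length : Int) 1).foldl (fun acc2 i =>
      acc2 ++ [(PySem.List.slice peptide2 (some i) (some (i + k))).sum]) acc) outSpectrum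
  PySem.List.sorted outSpectrum (fun x => x) false

def pvScore (candidate target : List Int) : Int :=
  let cCounter := PySem.Dict.counter (pvCyclicSpectrum candidate)
  let tCounter := PySem.Dict.counter target
  cCounter.keys.foldl (fun s mass =>
    if tCounter.contains mass then s + min (cCounter.getD mass 0) (tCounter.getD mass 0) else s) 0

def pvSelect (lb : PySem.Dict Int (List (List Int))) : List Int → List (List Int) → Int → List (List Int)
  | [], survivors, _ => survivors
  | s :: rest, survivors, todo =>
    let grp := lb.getD s []
    let survivors2 := survivors ++ grp
    let todo2 := todo - (grp.length : Int)
    if todo2 < 0 then survivors2 else pvSelect lb rest survivors2 todo2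

def cut (candidates : List (List Int)) (target : List Int) (n : Int) : List (List Int) :=
  if (candidates.length : Int) ≤ n then candidates
  else
    let lb := candidates.foldl (fun lb c =>
      let s := pvScore c target
      if lb.contains s then lb.insert s (lb.getD s [] ++ [c]) else lb.insert s [c])
      PySem.Dict.empty
    pvSelect lb (PySem.List.sorted lb.keys (fun x => x) true) [] n

-- ===== PORT B =====
-- hand port of collections.Counter.__and__ (exact: min of the counts, keep the positive ones,
-- left operand's key order)
def pvCounterAnd (cc tc : PySem.Dict Int Int) : PySem.Dict Int Int :=
  cc.items.foldl (fun d p =>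
    let w := min p.2 (tc.getD p.1 0)
    if 0 < w then d.insert p.1 w else d) PySem.Dict.empty

def pvScoreAlt (candidate target : List Int) : Int :=
  let L := candidate.length
  let pre := (candidate ++ candidate).foldl
    (fun pre m => pre ++ [PySem.List.pyGetD pre (-1) 0 + m]) [0]
  let spectrum : List Int := [0, PySem.List.pyGetD pre (L : Int) 0]
  let spectrum := (PySem.List.pyRange 1 (L : Int) 1).foldl (fun acc k =>
    (PySem.List.pyRange 0 (L : Int) 1).foldl (fun acc2 i =>
      acc2 ++ [PySem.List.pyGetD pre (i + k) 0 - PySem.List.pyGetD pre i 0]) acc) spectrum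
  (pvCounterAnd (PySem.Dict.counter spectrum) (PySem.Dict.counter target)).values.sum

def pvSelectAlt (pairs : List (Int × List Int)) (n : Int) : List Int → List (List Int) → List (List Int)
  | [], out => out
  | s :: rest, out =>
    let out2 := out ++ (pairs.filter (fun p => p.1 == s)).map (·.2)
    if n < (out2.length : Int) then out2 else pvSelectAlt pairs n rest out2

def cut_alt (candidates : List (List Int)) (target : List Int) (n : Int) : List (List Int) :=
  if (candidates.length : Int) ≤ n then candidates
  else
    let pairs := candidates.map (fun c => (pvScoreAlt c target, c))
    pvSelectAlt pairs n
      (PySem.List.sorted (PySem.Set.ofList (pairs.map (·.1))) (fun x => x) true) []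

-- ===== PRECONDITION & SPEC =====
def Spec_cut (candidates : List (List Int)) (target : List Int) (n : Int) (out : List (List Int)) : Prop := out = cut_alt candidates target n
instance (candidates : List (List Int)) (target : List Int) (n : Int) (out : List (List Int)) : Decidable (Spec_cut candidates target n out) := by unfold Spec_cut; infer_instance

-- ===== CLAIM (what is proved, stated in full; the proofs are below) =====
def Claim_equal_cut : Prop := ∀ (candidates : List (List Int)) (target : List Int) (n : Int), Dom_cut candidates target n → Spec_cut candidates target n (cut candidates target n)

-- ===== LEMMAS AND PROOFS =====

-- a negative index -1 reads the last element
theorem pvGetD_append_neg_one (l : List Int) (y d : Int) :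
    PySem.List.pyGetD (l ++ [y]) (-1) d = y := by
  simp only [PySem.List.pyGetD, PySem.List.pyGet?, PySem.List.pyIdx?, List.length_append,
    List.length_cons, List.length_nil]
  rw [if_neg (by omega), if_pos (by omega)]
  have h : l.length + 0 + 1 - (-(-1 : Int)).toNat = l.length := by omega
  rw [h]
  simp

-- the prefix-sum list B builds is the list of partial sums
theorem pvPrefix_eq (xs : List Int) :
    xs.foldl (fun pre m => pre ++ [PySem.List.pyGetD pre (-1) 0 + m]) [0]
      = (List.range (xs.length + 1)).map (fun j => ((xs.take j).sum)) := by
  induction xs using List.reverseRecOn with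
  | nil => rfl
  | append_singleton ys m ih =>
    rw [List.foldl_append, ih]
    have hsplit : (List.range (ys.length + 1)).map (fun j => ((ys.take j).sum))
        = (List.range ys.length).map (fun j => ((ys.take j).sum)) ++ [ys.sum] := by
      rw [List.range_succ, List.map_append]; simp
    rw [List.foldl_cons, List.foldl_nil, hsplit, List.append_assoc, pvGetD_append_neg_one]
    have hlen : (ys ++ [m]).length + 1 = (ys.length + 1) + 1 := by simp
    rw [hlen, List.range_succ, List.map_append]
    have h2 : (List.range (ys.length + 1)).map (fun j => (((ys ++ [m]).take j).sum))
        = (List.range (ys.length + 1)).map (fun j => ((ys.take j).sum)) := by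
      apply List.map_congr_left
      intro j hj
      simp at hj
      rw [List.take_append_of_le_length (by omega)]
    rw [h2, hsplit]
    simp

theorem pvPre_getD (xs : List Int) (j : Nat) (hj : j ≤ xs.length) :
    PySem.List.pyGetD
        (xs.foldl (fun pre m => pre ++ [PySem.List.pyGetD pre (-1) 0 + m]) [0]) (j : Int) 0
      = (xs.take j).sum := by
  rw [pvPrefix_eq, PySem.List.pyGetD_natCast, List.getD_eq_getElem?_getD, List.getElem?_map,
    List.getElem?_range (by omega)]
  rfl

-- a contiguous slice sum is a difference of two partial sums
theorem pvSliceSum (xs : List Int) (a k : Nat) :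
    ((xs.drop a).take k).sum = (xs.take (a + k)).sum - (xs.take a).sum := by
  rw [List.take_add, List.sum_append]; ring

-- the unsorted spectrum list B builds equals the unsorted list built inside A
theorem pvSpecRaw_eq (p : List Int) (pre : List Int)
    (hpre : pre = (p ++ p).foldl (fun pr m => pr ++ [PySem.List.pyGetD pr (-1) 0 + m]) [0]) :
    (PySem.List.pyRange 1 (p.length : Int) 1).foldl (fun acc k =>
       (PySem.List.pyRange 0 (p.length : Int) 1).foldl (fun acc2 i =>
         acc2 ++ [PySem.List.pyGetD pre (i + k) 0 - PySem.List.pyGetD pre i 0]) acc)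
       [0, PySem.List.pyGetD pre (p.length : Int) 0]
      = (PySem.List.pyRange 1 (p.length : Int) 1).foldl (fun acc k =>
          (PySem.List.pyRange 0 (p.length : Int) 1).foldl (fun acc2 i =>
            acc2 ++ [(PySem.List.slice (p ++ p) (some i) (some (i + k))).sum]) acc)
          [0, p.sum] := by
  subst hpre
  have hgd : ∀ (j : Nat), j ≤ (p ++ p).length →
      PySem.List.pyGetD
          ((p ++ p).foldl (fun pr m => pr ++ [PySem.List.pyGetD pr (-1) 0 + m]) [0]) (j : Int) 0
        = ((p ++ p).take j).sum := fun j hj => pvPre_getD _ j hj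
  have hinit : PySem.List.pyGetD
      ((p ++ p).foldl (fun pr m => pr ++ [PySem.List.pyGetD pr (-1) 0 + m]) [0]) (p.length : Int) 0
      = p.sum := by
    rw [hgd p.length (by simp), List.take_left]
  rw [hinit]
  apply PySem.List.foldl_congr_mem
  intro acc k hk
  apply PySem.List.foldl_congr_mem
  intro acc2 i hi
  rw [PySem.List.mem_pyRange_one] at hk hi
  congr 1
  congr 1
  obtain ⟨a, rfl⟩ : ∃ a : Nat, i = (a : Int) := ⟨i.toNat, (Int.toNat_of_nonneg hi.1).symm⟩
  obtain ⟨b, rfl⟩ : ∃ b : Nat, k = (b : Int) := ⟨k.toNat, (Int.toNat_of_nonneg (by omega)).symm⟩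
  have hab : ((a : Int) + (b : Int)) = ((a + b : Nat) : Int) := by push_cast; ring
  rw [hab, hgd a (by simp; omega), hgd (a + b) (by simp; omega), PySem.List.slice_natCast]
  have hba : a + b - a = b := by omega
  rw [hba, pvSliceSum]

-- both scores equal this order-insensitive canonical sum
def pvG (xs t : List Int) : Int :=
  ((PySem.Set.ofList xs).map (fun m =>
    if t.contains m then min ((xs.count m : Int)) ((t.count m : Int)) else 0)).sum

theorem pvScore_eq_G (c t : List Int) : pvScore c t = pvG (pvCyclicSpectrum c) t := by
  show (List.foldl
      (fun s mass => if (PySem.Dict.counter t).contains mass = true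
        then s + min ((PySem.Dict.counter (pvCyclicSpectrum c)).getD mass 0)
          ((PySem.Dict.counter t).getD mass 0) else s)
      0 (PySem.Dict.counter (pvCyclicSpectrum c)).keys) = _
  rw [PySem.Dict.keys_counter]
  rw [PySem.List.foldl_congr_mem _ _
    (fun s mass => s + (if t.contains mass then
      min (((pvCyclicSpectrum c).count mass : Int)) ((t.count mass : Int)) else 0)) 0
    (by
      intro s mass _
      rw [PySem.Dict.contains_counter, PySem.Dict.getD_counter, PySem.Dict.getD_counter]
      by_cases hm : mass ∈ t
      · simp [hm]
      · simp [hm])]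
  rw [PySem.List.foldl_add, pvG]
  ring

theorem pvSumFilterMap (l : List (Int × Int)) (q : Int × Int → Bool) (f : Int × Int → Int) :
    ((l.filter q).map f).sum = (l.map (fun x => if q x then f x else 0)).sum := by
  induction l with
  | nil => rfl
  | cons x tl ih => by_cases h : q x <;> simp [h, ih]

theorem pvCounterAnd_sum (xs t : List Int) :
    (pvCounterAnd (PySem.Dict.counter xs) (PySem.Dict.counter t)).values.sum = pvG xs t := by
  unfold pvCounterAnd
  show (List.foldl (fun d (p : Int × Int) => if 0 < min p.2 ((PySem.Dict.counter t).getD p.1 0)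
      then d.insert p.1 (min p.2 ((PySem.Dict.counter t).getD p.1 0)) else d)
      PySem.Dict.empty (PySem.Dict.counter xs).items).values.sum = pvG xs t
  rw [PySem.List.foldl_ite_eq_foldl_filter
    (fun pr : Int × Int => 0 < min pr.2 ((PySem.Dict.counter t).getD pr.1 0))
    (fun d (pr : Int × Int) => d.insert pr.1 (min pr.2 ((PySem.Dict.counter t).getD pr.1 0)))
    ((PySem.Dict.counter xs).items) PySem.Dict.empty]
  have hfst : (PySem.Dict.counter xs).items.map (fun p => p.1) = PySem.Set.ofList xs := by
    rw [PySem.Dict.items_counter, List.map_map]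
    exact List.map_id _
  have hnd : (((PySem.Dict.counter xs).items.filter
      (fun pr => decide (0 < min pr.2 ((PySem.Dict.counter t).getD pr.1 0)))).map
      (fun p => p.1)).Nodup := by
    refine List.Nodup.sublist (List.Sublist.map _ (List.filter_sublist)) ?_
    rw [hfst]
    exact PySem.Set.nodup_ofList xs
  simp only [PySem.Dict.values]
  rw [PySem.Dict.items_foldl_insert_fresh _ (fun p => p.1)
    (fun pr : Int × Int => min pr.2 ((PySem.Dict.counter t).getD pr.1 0)) PySem.Dict.empty
    (fun _ _ => PySem.Dict.contains_empty _) hnd]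
  show ((((PySem.Dict.counter xs).items.filter
      (fun pr => decide (0 < min pr.2 ((PySem.Dict.counter t).getD pr.1 0)))).map
      (fun pr : Int × Int => (pr.1, min pr.2 ((PySem.Dict.counter t).getD pr.1 0)))).map
      (fun p => p.2)).sum = pvG xs t
  rw [List.map_map]
  have hcomp : ((fun p : Int × Int => p.2)
        ∘ fun pr : Int × Int => (pr.1, min pr.2 ((PySem.Dict.counter t).getD pr.1 0)))
      = fun pr : Int × Int => min pr.2 ((PySem.Dict.counter t).getD pr.1 0) := rfl
  rw [hcomp, pvSumFilterMap, PySem.Dict.items_counter, List.map_map, pvG]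
  apply congrArg
  apply List.map_congr_left
  intro m hm
  have hmx : m ∈ xs := (PySem.Set.mem_ofList xs m).1 hm
  have hcx : 0 < xs.count m := List.count_pos_iff.2 hmx
  simp only [Function.comp, PySem.Dict.getD_counter]
  by_cases hmt : m ∈ t
  · have hct : 0 < t.count m := List.count_pos_iff.2 hmt
    rw [if_pos (by simp only [decide_eq_true_eq, lt_min_iff]; omega), if_pos (by simpa using hmt)]
  · have hct : t.count m = 0 := List.count_eq_zero.2 hmt
    rw [hct]
    rw [if_neg (by simp only [decide_eq_true_eq, lt_min_iff]; omega), if_neg (by simpa using hmt)]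

theorem pvScoreAlt_eq_G (c t : List Int) :
    pvScoreAlt c t
      = pvG ((PySem.List.pyRange 1 (c.length : Int) 1).foldl (fun acc k =>
          (PySem.List.pyRange 0 (c.length : Int) 1).foldl (fun acc2 i =>
            acc2 ++ [(PySem.List.slice (c ++ c) (some i) (some (i + k))).sum]) acc)
          [0, c.sum]) t := by
  show (pvCounterAnd (PySem.Dict.counter
      ((PySem.List.pyRange 1 (c.length : Int) 1).foldl (fun acc k =>
        (PySem.List.pyRange 0 (c.length : Int) 1).foldl (fun acc2 i =>
          acc2 ++ [PySem.List.pyGetD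
              ((c ++ c).foldl (fun pr m => pr ++ [PySem.List.pyGetD pr (-1) 0 + m]) [0]) (i + k) 0
            - PySem.List.pyGetD
              ((c ++ c).foldl (fun pr m => pr ++ [PySem.List.pyGetD pr (-1) 0 + m]) [0]) i 0]) acc)
        [0, PySem.List.pyGetD
            ((c ++ c).foldl (fun pr m => pr ++ [PySem.List.pyGetD pr (-1) 0 + m]) [0])
            (c.length : Int) 0]))
      (PySem.Dict.counter t)).values.sum = _
  rw [pvSpecRaw_eq c _ rfl, pvCounterAnd_sum]

theorem pvG_perm (xs ys t : List Int) (h : xs.Perm ys) : pvG xs t = pvG ys t := by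
  unfold pvG
  have hmem : ∀ m : Int, m ∈ PySem.Set.ofList xs ↔ m ∈ PySem.Set.ofList ys := by
    intro m
    rw [PySem.Set.mem_ofList, PySem.Set.mem_ofList]
    exact h.mem_iff
  have hperm : (PySem.Set.ofList xs).Perm (PySem.Set.ofList ys) :=
    (List.perm_ext_iff_of_nodup (PySem.Set.nodup_ofList xs) (PySem.Set.nodup_ofList ys)).2 hmem
  rw [List.map_congr_left (l := PySem.Set.ofList xs)
    (f := fun m => if t.contains m then min ((xs.count m : Int)) ((t.count m : Int)) else 0)
    (g := fun m => if t.contains m then min ((ys.count m : Int)) ((t.count m : Int)) else 0)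
    (fun m _ => by simp only [h.count_eq m])]
  exact (hperm.map _).sum_eq

theorem pvScore_eq_alt (c t : List Int) : pvScore c t = pvScoreAlt c t := by
  rw [pvScore_eq_G, pvScoreAlt_eq_G]
  apply pvG_perm
  show PySem.List.sorted _ (fun x => x) false |>.Perm _
  exact PySem.List.sorted_perm _ _ _

-- A's grouping loop is the modify-based group-by over the score/candidate pairs
theorem pvLb_eq_modify (key : List Int → Int) (candidates : List (List Int)) :
    candidates.foldl (fun lb c =>
        if lb.contains (key c) then lb.insert (key c) (lb.getD (key c) [] ++ [c])
        else lb.insert (key c) [c]) PySem.Dict.empty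
      = (candidates.map (fun c => (key c, c))).foldl
          (fun d p => d.modify p.1 [] (· ++ [p.2])) PySem.Dict.empty := by
  rw [List.foldl_map]
  apply PySem.List.foldl_congr_mem
  intro d c _
  show _ = d.insert (key c) (d.getD (key c) [] ++ [c])
  by_cases hc : d.contains (key c)
  · rw [if_pos hc]
  · rw [if_neg hc, PySem.Dict.getD_of_not_contains d [] (by simpa using hc), List.nil_append]

-- the two selection loops agree when the dict's groups are the filtered groups
theorem pvSelect_eq_alt (lb : PySem.Dict Int (List (List Int)))
    (pairs : List (Int × List Int)) (n : Int)
    (hg : ∀ s, lb.getD s [] = (pairs.filter (fun p => p.1 == s)).map (·.2)) :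
    ∀ (ks : List Int) (surv : List (List Int)),
      pvSelect lb ks surv (n - (surv.length : Int)) = pvSelectAlt pairs n ks surv := by
  intro ks
  induction ks with
  | nil => intro surv; rfl
  | cons s rest ih =>
    intro surv
    rw [pvSelect, pvSelectAlt]
    simp only [hg s]
    set g := (pairs.filter (fun p => p.1 == s)).map (·.2) with hgdef
    have hcond : (n - (surv.length : Int) - (g.length : Int) < 0)
        ↔ (n < ((surv ++ g).length : Int)) := by
      rw [List.length_append]; push_cast; omega
    by_cases hb : n < ((surv ++ g).length : Int)
    · rw [if_pos (hcond.2 hb), if_pos hb]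
    · rw [if_neg (fun h => hb (hcond.1 h)), if_neg hb]
      have harg : n - ((surv ++ g).length : Int) = n - (surv.length : Int) - (g.length : Int) := by
        rw [List.length_append]; push_cast; omega
      rw [← harg, ih]

-- ===== VERDICT (by name: the statement is the Claim_ definition above) =====
theorem cut_spec : Claim_equal_cut := by
  intro candidates target n _
  show cut candidates target n = cut_alt candidates target n
  unfold cut cut_alt
  by_cases hle : (candidates.length : Int) ≤ n
  · rw [if_pos hle, if_pos hle]
  · rw [if_neg hle, if_neg hle]
    have hmap : candidates.map (fun c => (pvScore c target, c))
        = candidates.map (fun c => (pvScoreAlt c target, c)) :=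
      List.map_congr_left (fun c _ => by rw [pvScore_eq_alt])
    have hlb : candidates.foldl (fun lb c =>
        let s := pvScore c target
        if lb.contains s then lb.insert s (lb.getD s [] ++ [c]) else lb.insert s [c])
        PySem.Dict.empty
        = (candidates.map (fun c => (pvScoreAlt c target, c))).foldl
            (fun d p => d.modify p.1 [] (· ++ [p.2])) PySem.Dict.empty := by
      rw [pvLb_eq_modify (fun c => pvScore c target) candidates, hmap]
    rw [hlb]
    set pairs := candidates.map (fun c => (pvScoreAlt c target, c)) with hpairs
    show pvSelect
        (pairs.foldl (fun d p => d.modify p.1 [] (· ++ [p.2])) PySem.Dict.empty)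
        (PySem.List.sorted
          (pairs.foldl (fun d p => d.modify p.1 [] (· ++ [p.2])) PySem.Dict.empty).keys
          (fun x => x) true) [] n
      = pvSelectAlt pairs n
          (PySem.List.sorted (PySem.Set.ofList (pairs.map (·.1))) (fun x => x) true) []
    have hg : ∀ s, ((pairs.foldl (fun d p => d.modify p.1 [] (· ++ [p.2]))
        PySem.Dict.empty).getD s [])
        = (pairs.filter (fun p => p.1 == s)).map (·.2) := by
      intro s
      rw [PySem.Dict.getD_foldl_modify_append, PySem.Dict.getD_empty, List.nil_append]
    have hkeys : (pairs.foldl (fun d p => d.modify p.1 [] (· ++ [p.2]))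
        PySem.Dict.empty).keys = PySem.Set.ofList (pairs.map (·.1)) := by
      rw [PySem.Dict.keys_foldl_modify_key pairs (fun p => p.1) [] (fun d p => (· ++ [p.2]))
        PySem.Dict.empty]
      rw [PySem.Dict.keys_empty, PySem.Set.update_nil_left]
    rw [hkeys]
    have := pvSelect_eq_alt _ pairs n hg
      (PySem.List.sorted (PySem.Set.ofList (pairs.map (·.1))) (fun x => x) true) []
    simpa using this
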